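-- pv_equiv track=rewrite | github.com/Whoopsll/cube-studio | job-template/job/AccessMgtServer/Utiles/NormalizeFunc.py | segmentation_mapping
-- ===== SOURCE A (Python) =====
-- def segmentation_mapping(x, x_list, y_list):
--     """
--     台阶分段函数
--     x[i]<x<x[i+1] -> y = y[i]
--     :param x:输入x值
--     :param x_list:x值列表
--     :param y_list:y值列表
--     :return:是否成功，y值，错误信息
--     """
--     errorInfo = ""
--     result = 0
--     ifSuccess = False
--     if len(x_list) != len(y_list):
--         errorInfo = "x与y值列表长度不一致！"
--         return ifSuccess, result, errorInfo
--     if not all(x_list[i] <= x_list[i + 1] for i in range(len(x_list) - 1)):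
--         errorInfo = "x_list必须按升序排列！"
--         return ifSuccess, result, errorInfo
--     if min(y_list) < 0:
--         errorInfo = "存在小于0的y值！"
--         return ifSuccess, result, errorInfo
--
--     # 处理x小于最小分段点的情况
--     if x <= x_list[0]:
--         result = y_list[0]
--         ifSuccess = True
--     # 处理x大于最大分段点的情况
--     elif x >= x_list[-1]:
--         result = y_list[-1]
--         ifSuccess = True
--     else:
--         for i in range(len(x_list) - 1):
--             if x_list[i] <= x <= x_list[i + 1]:
--                 # 计算线性插值
--                 result = y_list[i]
--                 ifSuccess = True
--     result = result
--     return ifSuccess, result, errorInfo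
-- ===== SOURCE B (Python) =====
-- import bisect
--
--
-- def segmentation_mapping(x, x_list, y_list):
--     if len(x_list) != len(y_list):
--         return False, 0, "x与y值列表长度不一致！"
--     if any(a > b for a, b in zip(x_list, x_list[1:])):
--         return False, 0, "x_list必须按升序排列！"
--     if min(y_list) < 0:
--         return False, 0, "存在小于0的y值！"
--     if x <= x_list[0]:
--         return True, y_list[0], ""
--     if x >= x_list[-1]:
--         return True, y_list[-1], ""
--     return True, y_list[bisect.bisect_right(x_list, x) - 1], ""
-- ===== Notes on version B (the rewrite author's own statement) =====
-- stated objective: idiomatic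
-- what changed: The no-break linear scan over all intervals (last match wins) is replaced by a bisect_right binary search for the last index with x_list[i] <= x, and the index-based monotonicity check and accumulator-variable control flow are replaced by a pairwise zip scan with early returns.
import Mathlib
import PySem

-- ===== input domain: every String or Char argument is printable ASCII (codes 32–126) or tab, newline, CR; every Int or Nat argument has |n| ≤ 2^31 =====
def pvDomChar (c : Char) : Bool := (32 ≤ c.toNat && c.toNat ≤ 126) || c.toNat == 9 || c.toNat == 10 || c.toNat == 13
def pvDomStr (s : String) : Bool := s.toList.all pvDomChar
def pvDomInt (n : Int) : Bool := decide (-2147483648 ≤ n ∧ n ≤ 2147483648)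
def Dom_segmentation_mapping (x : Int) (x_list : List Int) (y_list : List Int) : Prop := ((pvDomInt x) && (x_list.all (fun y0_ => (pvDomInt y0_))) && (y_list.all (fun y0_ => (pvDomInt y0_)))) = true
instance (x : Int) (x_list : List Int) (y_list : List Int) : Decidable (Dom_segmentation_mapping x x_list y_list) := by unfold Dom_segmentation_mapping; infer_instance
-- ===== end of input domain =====

-- B replaces A's no-break linear interval scan by a bisect_right binary search; return value equivalence proved on Pre_.

-- ===== PORT A =====
def segmentation_mapping (x : Int) (x_list : List Int) (y_list : List Int) : Bool × Int × String :=
  if x_list.length ≠ y_list.length then (false, 0, "x与y值列表长度不一致！")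
  else if ¬ ((PySem.List.pyRange 0 ((x_list.length : Int) - 1) 1).all
      (fun i => decide (PySem.List.pyGetD x_list i 0 ≤ PySem.List.pyGetD x_list (i + 1) 0)) = true) then
    (false, 0, "x_list必须按升序排列！")
  else
    match PySem.List.min? y_list (fun y => y) with
    | none => (false, 0, "")  -- min([]) raises ValueError in Python; excluded by Pre_
    | some m =>
      if m < 0 then (false, 0, "存在小于0的y值！")
      else if x ≤ PySem.List.pyGetD x_list 0 0 then (true, PySem.List.pyGetD y_list 0 0, "")
      else if x ≥ PySem.List.pyGetD x_list (-1) 0 then (true, PySem.List.pyGetD y_list (-1) 0, "")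
      else
        let st := (PySem.List.pyRange 0 ((x_list.length : Int) - 1) 1).foldl
          (fun (st : Int × Bool) i =>
            if PySem.List.pyGetD x_list i 0 ≤ x ∧ x ≤ PySem.List.pyGetD x_list (i + 1) 0 then
              (PySem.List.pyGetD y_list i 0, true)
            else st) (0, false)
        (st.2, st.1, "")

-- ===== PORT B =====
-- port of bisect.bisect_right (CPython's lo/hi binary search, exact on Int lists;
-- the fuel argument only guarantees termination: hi - lo shrinks every step, so
-- fuel = initial hi suffices and never changes the result)
def bisectRightGo : Nat → List Int → Int → Nat → Nat → Nat
  | 0, _, _, lo, _ => lo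
  | fuel + 1, a, x, lo, hi =>
    if lo < hi then
      if x < a.getD ((lo + hi) / 2) 0 then bisectRightGo fuel a x lo ((lo + hi) / 2)
      else bisectRightGo fuel a x ((lo + hi) / 2 + 1) hi
    else lo

def segmentation_mapping_alt (x : Int) (x_list : List Int) (y_list : List Int) : Bool × Int × String :=
  if x_list.length ≠ y_list.length then (false, 0, "x与y值列表长度不一致！")
  else if (x_list.zip (x_list.drop 1)).any (fun p => decide (p.2 < p.1)) then
    (false, 0, "x_list必须按升序排列！")
  else
    match PySem.List.min? y_list (fun y => y) with
    | none => (false, 0, "")  -- min([]) raises ValueError in Python; excluded by Pre_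
    | some m =>
      if m < 0 then (false, 0, "存在小于0的y值！")
      else if x ≤ PySem.List.pyGetD x_list 0 0 then (true, PySem.List.pyGetD y_list 0 0, "")
      else if x ≥ PySem.List.pyGetD x_list (-1) 0 then (true, PySem.List.pyGetD y_list (-1) 0, "")
      else (true, PySem.List.pyGetD y_list ((bisectRightGo x_list.length x_list x 0 x_list.length : Int) - 1) 0, "")

-- ===== PRECONDITION & SPEC =====
-- Pre_ excludes only x_list = [] ∧ y_list = [], where Python A reaches min([]) and raises ValueError.
def Pre_segmentation_mapping (x : Int) (x_list : List Int) (y_list : List Int) : Prop :=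
  ¬ (x_list = [] ∧ y_list = [])
instance (x : Int) (x_list : List Int) (y_list : List Int) : Decidable (Pre_segmentation_mapping x x_list y_list) := by unfold Pre_segmentation_mapping; infer_instance

def pvWitness_segmentation_mapping : Int × List Int × List Int := (3, [0, 2, 5], [1, 4, 9])

def Spec_segmentation_mapping (x : Int) (x_list : List Int) (y_list : List Int) (out : Bool × Int × String) : Prop := out = segmentation_mapping_alt x x_list y_list
instance (x : Int) (x_list : List Int) (y_list : List Int) (out : Bool × Int × String) : Decidable (Spec_segmentation_mapping x x_list y_list out) := by unfold Spec_segmentation_mapping; infer_instance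

-- ===== CLAIM (what is proved, stated in full; the proofs are below) =====
def Claim_equal_segmentation_mapping : Prop := ∀ (x : Int) (x_list : List Int) (y_list : List Int), Dom_segmentation_mapping x x_list y_list → Pre_segmentation_mapping x x_list y_list → Spec_segmentation_mapping x x_list y_list (segmentation_mapping x x_list y_list)

-- ===== LEMMAS AND PROOFS =====


-- adjacent-sorted check written with indices (port A's form) characterised by getElem
theorem allA_iff (l : List Int) :
    ((PySem.List.pyRange 0 ((l.length : Int) - 1) 1).all
      (fun i => decide (PySem.List.pyGetD l i 0 ≤ PySem.List.pyGetD l (i + 1) 0)) = true)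
    ↔ ∀ k : Nat, (h : k + 1 < l.length) → l[k] ≤ l[k + 1] := by
  rw [List.all_eq_true]
  constructor
  · intro H k hk
    have hmem : (k : Int) ∈ PySem.List.pyRange 0 ((l.length : Int) - 1) 1 := by
      rw [PySem.List.mem_pyRange_one]; constructor <;> omega
    have h2 := H _ hmem
    rw [decide_eq_true_iff] at h2
    rw [PySem.List.pyGetD_eq_getElem _ _ (by omega) (by push_cast; omega),
        PySem.List.pyGetD_eq_getElem _ _ (by omega) (by omega)] at h2
    have e1 : ((k : Int)).toNat = k := by omega
    have e2 : ((k : Int) + 1).toNat = k + 1 := by omega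
    simp only [e1, e2] at h2
    exact h2
  · intro H i hmem
    rw [PySem.List.mem_pyRange_one] at hmem
    obtain ⟨h0, h1⟩ := hmem
    lift i to Nat using h0 with k
    rw [decide_eq_true_iff]
    rw [PySem.List.pyGetD_eq_getElem _ _ (by omega) (by omega),
        PySem.List.pyGetD_eq_getElem _ _ (by omega) (by omega)]
    have e1 : ((k : Int)).toNat = k := by omega
    have e2 : ((k : Int) + 1).toNat = k + 1 := by omega
    simp only [e1, e2]
    exact H k (by omega)

-- adjacent-sorted check written with zip (port B's form) characterised by getElem
theorem anyB_iff (l : List Int) :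
    ((l.zip (l.drop 1)).any (fun p => decide (p.2 < p.1)) = true)
    ↔ ∃ k : Nat, ∃ h : k + 1 < l.length, l[k + 1] < l[k] := by
  rw [List.any_eq_true]
  constructor
  · rintro ⟨p, hp, hlt⟩
    rw [List.mem_iff_getElem] at hp
    obtain ⟨k, hk, hpk⟩ := hp
    have hk' : k + 1 < l.length := by
      have := hk; rw [List.length_zip, List.length_drop] at this; omega
    refine ⟨k, hk', ?_⟩
    rw [decide_eq_true_iff] at hlt
    rw [List.getElem_zip] at hpk
    have h1 : p.1 = l[k] := by rw [← hpk]
    have h2 : p.2 = l[k + 1] := by rw [← hpk]; simp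
    rw [h1, h2] at hlt
    exact hlt
  · rintro ⟨k, hk, hlt⟩
    refine ⟨(l[k], l[k + 1]), ?_, by simpa using hlt⟩
    rw [List.mem_iff_getElem]
    refine ⟨k, by rw [List.length_zip, List.length_drop]; omega, ?_⟩
    rw [List.getElem_zip]
    simp

-- the two monotonicity checks decide the same thing
theorem condEq (l : List Int) :
    ((l.zip (l.drop 1)).any (fun p => decide (p.2 < p.1)))
    = !((PySem.List.pyRange 0 ((l.length : Int) - 1) 1).all
        (fun i => decide (PySem.List.pyGetD l i 0 ≤ PySem.List.pyGetD l (i + 1) 0))) := by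
  cases hb : ((PySem.List.pyRange 0 ((l.length : Int) - 1) 1).all
      (fun i => decide (PySem.List.pyGetD l i 0 ≤ PySem.List.pyGetD l (i + 1) 0))) with
  | false =>
    have hnall : ¬ ∀ k : Nat, (h : k + 1 < l.length) → l[k] ≤ l[k + 1] := by
      intro H
      rw [← allA_iff l] at H
      rw [H] at hb; cases hb
    rw [Classical.not_forall] at hnall
    obtain ⟨k, hk2⟩ := hnall
    rw [Classical.not_forall] at hk2
    obtain ⟨hk, hlt0⟩ := hk2
    simp only [Bool.not_false]
    exact (anyB_iff l).2 ⟨k, hk, by omega⟩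
  | true =>
    have hall := (allA_iff l).1 hb
    simp only [Bool.not_true]
    rw [Bool.eq_false_iff]
    intro hany
    obtain ⟨k, hk, hlt⟩ := (anyB_iff l).1 hany
    have := hall k hk
    omega

theorem sorted_mono (l : List Int) (hs : ∀ k : Nat, (h : k + 1 < l.length) → l[k] ≤ l[k + 1]) :
    ∀ j i : Nat, (hj : j < l.length) → (hij : i ≤ j) → l[i]'(Nat.lt_of_le_of_lt hij hj) ≤ l[j] := by
  intro j
  induction j with
  | zero =>
    intro i hj hij
    have hi0 : i = 0 := by omega
    subst hi0
    exact le_refl _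
  | succ j ih =>
    intro i hj hij
    rcases Nat.lt_or_ge i (j + 1) with h | h
    · exact le_trans (ih i (by omega) (by omega)) (hs j hj)
    · have hieq : i = j + 1 := by omega
      subst hieq
      exact le_refl _

theorem bisectGo_spec (l : List Int) (x : Int)
    (hs : ∀ k : Nat, (h : k + 1 < l.length) → l[k] ≤ l[k + 1]) :
    ∀ fuel lo hi : Nat, hi - lo ≤ fuel → lo ≤ hi → hi ≤ l.length →
    (∀ i : Nat, (h : i < l.length) → i < lo → l[i] ≤ x) →
    (∀ i : Nat, (h : i < l.length) → hi ≤ i → x < l[i]) →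
    lo ≤ bisectRightGo fuel l x lo hi ∧ bisectRightGo fuel l x lo hi ≤ hi ∧
      (∀ i : Nat, (h : i < l.length) → i < bisectRightGo fuel l x lo hi → l[i] ≤ x) ∧
      (∀ i : Nat, (h : i < l.length) → bisectRightGo fuel l x lo hi ≤ i → x < l[i]) := by
  intro fuel
  induction fuel with
  | zero =>
    intro lo hi hfuel hlohi hhi hlow hhigh
    simp only [bisectRightGo]
    exact ⟨le_refl _, by omega, fun i h hil => hlow i h hil, fun i h hil => hhigh i h (by omega)⟩
  | succ fuel ih =>
    intro lo hi hfuel hlohi hhi hlow hhigh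
    simp only [bisectRightGo]
    by_cases hlt : lo < hi
    · rw [if_pos hlt]
      have hmidlt : (lo + hi) / 2 < l.length := by omega
      have hget : l.getD ((lo + hi) / 2) 0 = l[(lo + hi) / 2] := List.getD_eq_getElem l 0 hmidlt
      by_cases hx : x < l.getD ((lo + hi) / 2) 0
      · rw [if_pos hx]
        rw [hget] at hx
        have hhigh' : ∀ i : Nat, (h : i < l.length) → (lo + hi) / 2 ≤ i → x < l[i] := by
          intro i h hmi
          exact lt_of_lt_of_le hx (sorted_mono l hs i ((lo + hi) / 2) h hmi)
        have hrec := ih lo ((lo + hi) / 2) (by omega) (by omega) (by omega) hlow hhigh'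
        exact ⟨hrec.1, by omega, hrec.2.2.1, hrec.2.2.2⟩
      · rw [if_neg hx]
        rw [hget] at hx
        rw [not_lt] at hx
        have hlow' : ∀ i : Nat, (h : i < l.length) → i < (lo + hi) / 2 + 1 → l[i] ≤ x := by
          intro i h hi2
          exact le_trans (sorted_mono l hs ((lo + hi) / 2) i hmidlt (by omega)) hx
        have hrec := ih ((lo + hi) / 2 + 1) hi (by omega) (by omega) hhi hlow' hhigh
        exact ⟨by omega, hrec.2.1, hrec.2.2.1, hrec.2.2.2⟩
    · rw [if_neg hlt]
      exact ⟨le_refl _, by omega, fun i h hil => hlow i h hil, fun i h hil => hhigh i h (by omega)⟩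

theorem foldl_if_id {α β : Type} (C : β → Prop) [DecidablePred C] (G : β → α) :
    ∀ (l : List β) (st : α), (∀ i ∈ l, ¬ C i) →
      l.foldl (fun st i => if C i then G i else st) st = st := by
  intro l
  induction l with
  | nil => intro st _; rfl
  | cons a t ih =>
    intro st H
    rw [List.foldl_cons, if_neg (H a (by simp))]
    exact ih st (fun i hi => H i (by simp [hi]))

theorem mainBranch (x : Int) (xl yl : List Int)
    (hlen : xl.length = yl.length)
    (hs : ∀ k : Nat, (h : k + 1 < xl.length) → xl[k] ≤ xl[k + 1])
    (hne : xl ≠ [])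
    (h0 : PySem.List.pyGetD xl 0 0 < x)
    (h1 : x < PySem.List.pyGetD xl (-1) 0) :
    ((PySem.List.pyRange 0 ((xl.length : Int) - 1) 1).foldl
        (fun (st : Int × Bool) i =>
          if PySem.List.pyGetD xl i 0 ≤ x ∧ x ≤ PySem.List.pyGetD xl (i + 1) 0 then
            (PySem.List.pyGetD yl i 0, true)
          else st) (0, false))
      = (PySem.List.pyGetD yl ((bisectRightGo xl.length xl x 0 xl.length : Int) - 1) 0, true) := by
  have hn1 : 1 ≤ xl.length := by
    cases xl with
    | nil => exact absurd rfl hne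
    | cons a t => simp
  have hspec := bisectGo_spec xl x hs xl.length 0 xl.length (by omega) (by omega) (le_refl _)
      (fun i h hi => by omega) (fun i h hi => by omega)
  set j := bisectRightGo xl.length xl x 0 xl.length with hj
  obtain ⟨-, hjle, hjlow, hjhigh⟩ := hspec
  have hx0 : xl[0]'(by omega) < x := by
    rw [PySem.List.pyGetD_eq_getElem _ _ (by omega) (by omega)] at h0
    simpa using h0
  have hxlast : x < xl[xl.length - 1]'(by omega) := by
    rw [PySem.List.pyGetD_neg_one _ _ hne] at h1
    rw [List.getLast_eq_getElem] at h1
    exact h1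
  have hj1 : 1 ≤ j := by
    by_contra hc
    have := hjhigh 0 (by omega) (by omega)
    omega
  have hjn : j ≤ xl.length - 1 := by
    by_contra hc
    have := hjlow (xl.length - 1) (by omega) (by omega)
    omega
  have hsplit : PySem.List.pyRange 0 ((xl.length : Int) - 1) 1
      = (PySem.List.pyRange 0 ((j : Int) - 1) 1 ++ [((j : Int) - 1)])
        ++ PySem.List.pyRange (j : Int) ((xl.length : Int) - 1) 1 := by
    rw [← PySem.List.pyRange_one_succ_right (show (0 : Int) ≤ (j : Int) - 1 by omega)]
    have hjj : ((j : Int) - 1) + 1 = (j : Int) := by ring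
    rw [hjj]
    exact PySem.List.pyRange_one_append 0 (j : Int) ((xl.length : Int) - 1) (by omega) (by omega)
  rw [hsplit, List.foldl_append, List.foldl_append]
  have hcond : PySem.List.pyGetD xl ((j : Int) - 1) 0 ≤ x
      ∧ x ≤ PySem.List.pyGetD xl (((j : Int) - 1) + 1) 0 := by
    constructor
    · rw [PySem.List.pyGetD_eq_getElem _ _ (by omega) (by omega)]
      exact hjlow (((j : Int) - 1).toNat) (by omega) (by omega)
    · have hjj : ((j : Int) - 1) + 1 = (j : Int) := by ring
      rw [hjj, PySem.List.pyGetD_eq_getElem _ _ (by omega) (by omega)]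
      exact le_of_lt (hjhigh ((j : Int)).toNat (by omega) (by omega))
  rw [List.foldl_cons, List.foldl_nil, if_pos hcond]
  rw [foldl_if_id]
  intro i hi
  rw [PySem.List.mem_pyRange_one] at hi
  intro hc
  obtain ⟨hc1, hc2⟩ := hc
  rw [PySem.List.pyGetD_eq_getElem _ _ (by omega) (by omega)] at hc1
  exact absurd hc1 (not_le.2 (hjhigh i.toNat (by omega) (by omega)))

-- ===== VERDICT (by name: the statement is the Claim_ definition above) =====
theorem segmentation_mapping_spec : Claim_equal_segmentation_mapping := by
  intro x xl yl hdom hpre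
  unfold Spec_segmentation_mapping segmentation_mapping segmentation_mapping_alt
  by_cases hlen : xl.length = yl.length
  · have hlen' : ¬ (xl.length ≠ yl.length) := by omega
    rw [if_neg hlen', if_neg hlen', condEq xl]
    by_cases hball : ((PySem.List.pyRange 0 ((xl.length : Int) - 1) 1).all
        (fun i => decide (PySem.List.pyGetD xl i 0 ≤ PySem.List.pyGetD xl (i + 1) 0))) = true
    · rw [hball, if_neg (show ¬¬(true = true) by simp), if_neg (show ¬((!true) = true) by simp)]
      cases hmin : PySem.List.min? yl (fun y => y) with
      | none => rfl
      | some m =>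
        simp only []
        by_cases hm : m < 0
        · rw [if_pos hm, if_pos hm]
        · rw [if_neg hm, if_neg hm]
          by_cases hx0 : x ≤ PySem.List.pyGetD xl 0 0
          · rw [if_pos hx0, if_pos hx0]
          · rw [if_neg hx0, if_neg hx0]
            by_cases hx1 : x ≥ PySem.List.pyGetD xl (-1) 0
            · rw [if_pos hx1, if_pos hx1]
            · rw [if_neg hx1, if_neg hx1]
              have hne : yl ≠ [] := List.ne_nil_of_mem (PySem.List.min?_mem hmin)
              have hxne : xl ≠ [] := by
                intro h
                apply hne
                rw [h] at hlen
                exact List.length_eq_zero_iff.1 (by simpa using hlen.symm)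
              have hsrt := (allA_iff xl).1 hball
              have hmb := mainBranch x xl yl hlen hsrt hxne (by omega) (by omega)
              rw [hmb]
    · have hb : ((PySem.List.pyRange 0 ((xl.length : Int) - 1) 1).all
          (fun i => decide (PySem.List.pyGetD xl i 0 ≤ PySem.List.pyGetD xl (i + 1) 0))) = false := by
        rwa [Bool.not_eq_true] at hball
      rw [hb, if_pos (show ¬(false = true) by simp), if_pos (show (!false) = true by simp)]
  · rw [if_pos hlen, if_pos hlen]
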